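-- pv_equiv track=rewrite | github.com/swayz032/aspire-backend | orchestrator/src/aspire_orchestrator/skillpacks/eli_inbox.py | _redact_email_fields
-- ===== SOURCE A (Python) =====
-- from typing import Any
--
-- def _redact_email_fields(data: dict[str, Any]) -> dict[str, Any]:
--     """DLP-redact email content for receipt storage (Law #9)."""
--     redacted: dict[str, Any] = {}
--     for key, value in data.items():
--         if key in ("subject", "body", "body_html", "body_text"):
--             redacted[key] = "<REDACTED>"
--         elif key in ("to", "from", "from_address", "reply_to"):
--             redacted[key] = "<EMAIL_REDACTED>"
--         else:
--             redacted[key] = value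
--     return redacted
-- ===== SOURCE B (Python) =====
-- def _redact_email_fields(data: dict) -> dict:
--     """DLP-redact email content for receipt storage (Law #9)."""
--     redacted = dict(data)
--     for k in ("subject", "body", "body_html", "body_text"):
--         if k in redacted:
--             redacted[k] = "<REDACTED>"
--     for k in ("to", "from", "from_address", "reply_to"):
--         if k in redacted:
--             redacted[k] = "<EMAIL_REDACTED>"
--     return redacted
-- ===== Notes on version B (the rewrite author's own statement) =====
-- stated objective: idiomatic
-- what changed: B copies the dict once and then overwrites only the fixed redaction keys that are present (two small key loops), instead of A's single pass branching on every input key with two tuple-membership tests per item.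
import Mathlib
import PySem

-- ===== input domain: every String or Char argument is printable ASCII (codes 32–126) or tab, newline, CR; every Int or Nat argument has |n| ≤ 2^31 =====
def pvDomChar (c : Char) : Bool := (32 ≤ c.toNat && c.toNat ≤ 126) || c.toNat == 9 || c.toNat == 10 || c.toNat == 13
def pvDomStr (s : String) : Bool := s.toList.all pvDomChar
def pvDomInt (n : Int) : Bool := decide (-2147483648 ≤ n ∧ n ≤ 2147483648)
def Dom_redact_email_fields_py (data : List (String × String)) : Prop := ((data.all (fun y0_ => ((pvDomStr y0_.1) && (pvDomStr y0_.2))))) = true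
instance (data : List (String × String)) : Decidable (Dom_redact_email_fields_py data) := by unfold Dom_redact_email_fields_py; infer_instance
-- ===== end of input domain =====

-- B changes the decomposition (copy once, then overwrite the fixed redaction keys that are present); return value only, no speed claim.

-- ===== PORT A =====
-- The dict argument is represented as an association list; PySem.Dict.ofList is the
-- dict it denotes (first-key position, last value).  A iterates data.items() and
-- rebuilds a fresh dict, branching per key.
def redact_email_fields_py (data : List (String × String)) : List (String × String) :=
  ((PySem.Dict.ofList data).items.foldl
    (fun (d : PySem.Dict String String) (p : String × String) =>
      if p.1 ∈ ["subject", "body", "body_html", "body_text"] then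
        d.insert p.1 "<REDACTED>"
      else if p.1 ∈ ["to", "from", "from_address", "reply_to"] then
        d.insert p.1 "<EMAIL_REDACTED>"
      else
        d.insert p.1 p.2)
    PySem.Dict.empty).items

-- ===== PORT B =====
-- B: redacted = dict(data); overwrite each fixed redaction key only if present.
def redact_email_fields_py_alt (data : List (String × String)) : List (String × String) :=
  let d0 := PySem.Dict.ofList data
  let d1 := ["subject", "body", "body_html", "body_text"].foldl
    (fun (d : PySem.Dict String String) (k : String) =>
      if d.contains k then d.insert k "<REDACTED>" else d) d0
  let d2 := ["to", "from", "from_address", "reply_to"].foldl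
    (fun (d : PySem.Dict String String) (k : String) =>
      if d.contains k then d.insert k "<EMAIL_REDACTED>" else d) d1
  d2.items

-- ===== PRECONDITION & SPEC =====
def Spec_redact_email_fields_py (data : List (String × String)) (out : List (String × String)) : Prop := out = redact_email_fields_py_alt data
instance (data : List (String × String)) (out : List (String × String)) : Decidable (Spec_redact_email_fields_py data out) := by unfold Spec_redact_email_fields_py; infer_instance

-- ===== CLAIM (what is proved, stated in full; the proofs are below) =====
def Claim_equal_redact_email_fields_py : Prop := ∀ (data : List (String × String)), Dom_redact_email_fields_py data → Spec_redact_email_fields_py data (redact_email_fields_py data)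

-- ===== LEMMAS AND PROOFS =====

-- the per-item redaction both programs implement
def pvRedactPair (p : String × String) : String × String :=
  if p.1 ∈ ["subject", "body", "body_html", "body_text"] then (p.1, "<REDACTED>")
  else if p.1 ∈ ["to", "from", "from_address", "reply_to"] then (p.1, "<EMAIL_REDACTED>")
  else p

-- B's conditional-overwrite loop maps the items pointwise
lemma items_overwrite (ks : List String) (c : String) (d : PySem.Dict String String) :
    (ks.foldl (fun (d : PySem.Dict String String) (k : String) =>
        if d.contains k then d.insert k c else d) d).items
      = d.items.map (fun p => if p.1 ∈ ks then (p.1, c) else p) := by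
  induction ks generalizing d with
  | nil => simp
  | cons k ks ih =>
    have hstep : ((if d.contains k then d.insert k c else d)).items
        = d.items.map (fun p => if p.1 == k then (k, c) else p) := by
      by_cases h : d.contains k = true
      · simp [h, PySem.Dict.items_insert_of_contains d c h]
      · have h' : d.contains k = false := by simpa using h
        have hnk : ∀ p ∈ d.items, ¬ (p.1 == k) = true := by
          intro p hp hpk
          have : k ∈ d.keys := by
            simp only [PySem.Dict.keys]
            exact List.mem_map.mpr ⟨p, hp, by simpa using hpk⟩
          rw [PySem.Dict.contains_eq_decide_mem_keys] at h'
          simp [this] at h'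
        rw [if_neg h]
        symm
        calc d.items.map (fun p => if p.1 == k then (k, c) else p)
            = d.items.map id := List.map_congr_left (fun p hp => by simp [hnk p hp])
          _ = d.items := List.map_id _
    rw [List.foldl_cons, ih, hstep, List.map_map]
    apply List.map_congr_left
    intro p _
    by_cases hpk : p.1 = k
    · subst hpk; simp
    · simp [hpk, Function.comp]

lemma pvRedactPair_eq (p : String × String) :
    (fun q => if q.1 ∈ ["to", "from", "from_address", "reply_to"] then (q.1, "<EMAIL_REDACTED>") else q)
      ((fun q => if q.1 ∈ ["subject", "body", "body_html", "body_text"] then (q.1, "<REDACTED>") else q) p)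
    = pvRedactPair p := by
  unfold pvRedactPair
  by_cases h1 : p.1 ∈ ["subject", "body", "body_html", "body_text"]
  · have h2 : p.1 ∉ ["to", "from", "from_address", "reply_to"] := by
      intro h2; simp at h1 h2
      rcases h1 with h | h | h | h <;> rw [h] at h2 <;> simp at h2
    simp [h1, h2]
  · simp [h1]

lemma alt_items (data : List (String × String)) :
    redact_email_fields_py_alt data = (PySem.Dict.ofList data).items.map pvRedactPair := by
  unfold redact_email_fields_py_alt
  rw [items_overwrite, items_overwrite, List.map_map]
  exact List.map_congr_left (fun p _ => pvRedactPair_eq p)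

lemma a_items (data : List (String × String)) :
    redact_email_fields_py data = (PySem.Dict.ofList data).items.map pvRedactPair := by
  unfold redact_email_fields_py
  have hfun : (fun (d : PySem.Dict String String) (p : String × String) =>
      if p.1 ∈ ["subject", "body", "body_html", "body_text"] then d.insert p.1 "<REDACTED>"
      else if p.1 ∈ ["to", "from", "from_address", "reply_to"] then d.insert p.1 "<EMAIL_REDACTED>"
      else d.insert p.1 p.2)
      = (fun (d : PySem.Dict String String) (p : String × String) =>
          d.insert (pvRedactPair p).1 (pvRedactPair p).2) := by
    funext d p
    unfold pvRedactPair
    split_ifs <;> rfl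
  rw [hfun]
  have hnd : ((PySem.Dict.ofList data).items.map (fun p => (pvRedactPair p).1)).Nodup := by
    have hk : (fun (p : String × String) => (pvRedactPair p).1) = Prod.fst := by
      funext p; unfold pvRedactPair; split_ifs <;> rfl
    rw [hk]
    exact PySem.Dict.nodup_keys_ofList data
  have hfresh : ∀ p ∈ (PySem.Dict.ofList data).items,
      (PySem.Dict.empty : PySem.Dict String String).contains (pvRedactPair p).1 = false := by
    intro p _; exact PySem.Dict.contains_empty _
  rw [PySem.Dict.items_foldl_insert_fresh (PySem.Dict.ofList data).items (fun p => (pvRedactPair p).1) (fun p => (pvRedactPair p).2) PySem.Dict.empty hfresh hnd]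
  have hemp : (PySem.Dict.empty : PySem.Dict String String).items = [] := rfl
  rw [hemp, List.nil_append]

-- ===== VERDICT (by name: the statement is the Claim_ definition above) =====
theorem redact_email_fields_py_spec : Claim_equal_redact_email_fields_py := by
  intro data _
  unfold Spec_redact_email_fields_py
  rw [a_items, alt_items]
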